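-- pv_equiv track=rewrite | github.com/Rufflewind/_urandom | bernoulli-numbers/bernoulli.py | euler_zigzag
-- ===== SOURCE A (Python) =====
-- def euler_zigzag(n):
--     '''
--     Returns an iterator that generates the first `n` Euler zigzag numbers
--     (sequence A000111, also known as up/down numbers) as `int`s.
--
--     The sequence is computed using the Seidel triangle method.
--     '''
--     if n <= 0:
--         return
--     center = (n - 1) // 2
--     row = [0] * n
--     row[center] = 1
--     for i in range(n):
--         offset = (i - 1) // 2
--         if i % 2 == 1:
--             start = center + offset
--             stop  = start  - i
--             for j in range(start, stop, -1):
--                 row[j] += row[j + 1]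
--             yield row[stop + 1]
--         else:
--             start = center - offset
--             stop  = start  + i
--             for j in range(start, stop):
--                 row[j] += row[j - 1]
--             yield row[stop - 1]
-- ===== SOURCE B (Python) =====
-- def euler_zigzag(n):
--     '''
--     Returns an iterator generating the first `n` Euler zigzag numbers
--     (A000111) via the boustrophedon (Entringer) triangle: each new row is
--     built as cumulative sums of the reversed previous row.
--     '''
--     if n <= 0:
--         return
--     row = [1]
--     yield 1
--     for _ in range(1, n):
--         new = [0]
--         for x in reversed(row):
--             new.append(new[-1] + x)
--         row = new
--         yield row[-1]
-- ===== Notes on version B (the rewrite author's own statement) =====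
-- stated objective: idiomatic
-- what changed: Replaces the fixed-size center-indexed Seidel buffer with alternating in-place index sweeps by the classic boustrophedon (Entringer) triangle: each new row is a fresh growing list of cumulative sums of the reversed previous row, and its last entry is yielded.
import Mathlib
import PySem

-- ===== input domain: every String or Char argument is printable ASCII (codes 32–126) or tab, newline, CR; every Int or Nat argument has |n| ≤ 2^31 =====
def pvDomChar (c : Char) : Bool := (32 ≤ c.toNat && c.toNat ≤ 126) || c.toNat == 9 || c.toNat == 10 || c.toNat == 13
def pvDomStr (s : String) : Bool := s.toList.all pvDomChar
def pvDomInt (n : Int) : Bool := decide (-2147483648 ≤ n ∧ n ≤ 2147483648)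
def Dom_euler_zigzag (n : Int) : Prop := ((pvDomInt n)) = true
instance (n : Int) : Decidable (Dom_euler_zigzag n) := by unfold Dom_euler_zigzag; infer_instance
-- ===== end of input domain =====

-- B replaces A's fixed-size center-indexed Seidel buffer (alternating in-place index
-- sweeps) by the boustrophedon triangle: each new row is a fresh growing list of
-- cumulative sums of the reversed previous row; the generators are ported as the
-- lists of their yielded values.

-- ===== PORT A =====
-- All list indices A uses are provably in range (0 ≤ j < n), so the total forms
-- pyGetD / pySetD are exact here.
def azSweepUp (row : List Int) (start stop : Int) : List Int :=
  (PySem.List.pyRange start stop 1).foldl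
    (fun r j => PySem.List.pySetD r j (PySem.List.pyGetD r j 0 + PySem.List.pyGetD r (j - 1) 0)) row

def azSweepDown (row : List Int) (start stop : Int) : List Int :=
  (PySem.List.pyRange start stop (-1)).foldl
    (fun r j => PySem.List.pySetD r j (PySem.List.pyGetD r j 0 + PySem.List.pyGetD r (j + 1) 0)) row

def azStep (center : Int) (s : List Int × List Int) (i : Int) : List Int × List Int :=
  let offset := PySem.Int.floordiv (i - 1) 2
  if PySem.Int.mod i 2 == 1 then
    let start := center + offset
    let stop := start - i
    let row := azSweepDown s.1 start stop
    (row, s.2 ++ [PySem.List.pyGetD row (stop + 1) 0])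
  else
    let start := center - offset
    let stop := start + i
    let row := azSweepUp s.1 start stop
    (row, s.2 ++ [PySem.List.pyGetD row (stop - 1) 0])

def euler_zigzag (n : Int) : List Int :=
  if n ≤ 0 then []
  else
    let center := PySem.Int.floordiv (n - 1) 2
    let row := PySem.List.pySetD (List.replicate n.toNat (0 : Int)) center 1
    ((PySem.List.pyRange 0 n 1).foldl (azStep center) (row, [])).2

-- ===== PORT B =====
def zzNextRow (row : List Int) : List Int :=
  row.reverse.foldl (fun acc x => acc ++ [PySem.List.pyGetD acc (-1) 0 + x]) [0]

def euler_zigzag_alt (n : Int) : List Int :=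
  if n ≤ 0 then []
  else
    ((PySem.List.pyRange 1 n 1).foldl
      (fun (s : List Int × List Int) _ =>
        let r := zzNextRow s.1
        (r, s.2 ++ [PySem.List.pyGetD r (-1) 0])) ([1], [1])).2

-- ===== PRECONDITION & SPEC =====
def Spec_euler_zigzag (n : Int) (out : List Int) : Prop := out = euler_zigzag_alt n
instance (n : Int) (out : List Int) : Decidable (Spec_euler_zigzag n out) := by unfold Spec_euler_zigzag; infer_instance

-- ===== CLAIM (what is proved, stated in full; the proofs are below) =====
def Claim_equal_euler_zigzag : Prop := ∀ (n : Int), Dom_euler_zigzag n → Spec_euler_zigzag n (euler_zigzag n)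

-- ===== LEMMAS AND PROOFS =====

/-- Running partial sums starting from `c` (`c` itself not included). -/
def scanSum (c : Int) : List Int → List Int
  | [] => []
  | x :: l => (c + x) :: scanSum (c + x) l

/-- The Entringer rows produced by B. -/
def E : Nat → List Int
  | 0 => [1]
  | k + 1 => zzNextRow (E k)

lemma scanSum_append (c : Int) (v w : List Int) :
    scanSum c (v ++ w) = scanSum c v ++ scanSum (c + v.sum) w := by
  induction v generalizing c with
  | nil => simp [scanSum]
  | cons x l ih => simp [scanSum, ih, add_assoc]

lemma length_scanSum (c : Int) (v : List Int) : (scanSum c v).length = v.length := by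
  induction v generalizing c with
  | nil => rfl
  | cons x l ih => simp [scanSum, ih]

lemma foldl_append_last (l : List Int) (a : List Int) (c : Int)
    (h : PySem.List.pyGetD a (-1) 0 = c) (ha : a ≠ []) :
    l.foldl (fun acc x => acc ++ [PySem.List.pyGetD acc (-1) 0 + x]) a = a ++ scanSum c l := by
  induction l generalizing a c with
  | nil => simp [scanSum]
  | cons x t ih =>
      simp only [List.foldl_cons, h, scanSum]
      rw [ih (a ++ [c + x]) (c + x) (by simp [PySem.List.pyGetD_neg_one_append_singleton]) (by simp)]
      simp

lemma zzNextRow_eq (r : List Int) : zzNextRow r = 0 :: scanSum 0 r.reverse := by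
  unfold zzNextRow
  rw [foldl_append_last r.reverse [0] 0 (by decide) (by simp)]
  rfl

lemma E_succ (k : Nat) : E (k + 1) = 0 :: scanSum 0 (E k).reverse := by
  rw [E, zzNextRow_eq]

lemma length_E (k : Nat) : (E k).length = k + 1 := by
  induction k with
  | zero => rfl
  | succ k ih => rw [E_succ]; simp [length_scanSum, ih]

lemma E_ne_nil (k : Nat) : E k ≠ [] := by
  have := length_E k; intro h; simp [h] at this

/-- last element of a row, as B reads it. -/
def lastE (k : Nat) : Int := PySem.List.pyGetD (E k) (-1) 0

-- small indexing helpers on `pfx ++ x :: rest`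
lemma getD_append_len (pfx : List Int) (x : Int) (rest : List Int) :
    (pfx ++ x :: rest).getD pfx.length 0 = x := by
  simp [List.getD_append_right]

lemma getD_append_len1 (pfx : List Int) (x y : Int) (rest : List Int) :
    (pfx ++ x :: y :: rest).getD (pfx.length + 1) 0 = y := by
  have : (pfx ++ x :: y :: rest) = (pfx ++ [x]) ++ y :: rest := by simp
  rw [this]
  have := getD_append_len (pfx ++ [x]) y rest
  simpa using this

lemma set_append_len (pfx : List Int) (x : Int) (rest : List Int) (z : Int) :
    (pfx ++ x :: rest).set pfx.length z = pfx ++ z :: rest := by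
  simp [List.set_append]

lemma set_append_len1 (pfx : List Int) (x y : Int) (rest : List Int) (z : Int) :
    (pfx ++ x :: y :: rest).set (pfx.length + 1) z = pfx ++ x :: z :: rest := by
  have h1 : (pfx ++ x :: y :: rest) = (pfx ++ [x]) ++ y :: rest := by simp
  rw [h1]
  have := set_append_len (pfx ++ [x]) y rest z
  simpa using this

lemma set_append_len' (pfx : List Int) (x z : Int) (rest : List Int) (i : Nat)
    (h : i = pfx.length) : (pfx ++ x :: rest).set i z = pfx ++ z :: rest := by
  subst h; exact set_append_len pfx x rest z

/-- One `row[j] += row[j-1]` update, at index `pfx.length + 1`. -/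
lemma update_left (pfx : List Int) (x y : Int) (rest : List Int) :
    PySem.List.pySetD (pfx ++ x :: y :: rest) ((pfx.length : Int) + 1)
      (PySem.List.pyGetD (pfx ++ x :: y :: rest) ((pfx.length : Int) + 1) 0 +
       PySem.List.pyGetD (pfx ++ x :: y :: rest) ((pfx.length : Int) + 1 - 1) 0)
    = pfx ++ x :: (y + x) :: rest := by
  have h2 : (pfx.length : Int) + 1 - 1 = ((pfx.length : Nat) : Int) := by push_cast; ring
  have h1 : (pfx.length : Int) + 1 = ((pfx.length + 1 : Nat) : Int) := by push_cast; ring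
  rw [h2, h1, PySem.List.pySetD_natCast]
  simp only [PySem.List.pyGetD_natCast]
  rw [getD_append_len, getD_append_len1, set_append_len1]

/-- One `row[j] += row[j+1]` update, at index `pfx.length`. -/
lemma update_right (pfx : List Int) (x y : Int) (rest : List Int) :
    PySem.List.pySetD (pfx ++ x :: y :: rest) ((pfx.length : Int))
      (PySem.List.pyGetD (pfx ++ x :: y :: rest) ((pfx.length : Int)) 0 +
       PySem.List.pyGetD (pfx ++ x :: y :: rest) ((pfx.length : Int) + 1) 0)
    = pfx ++ (x + y) :: y :: rest := by
  have h1 : (pfx.length : Int) + 1 = ((pfx.length + 1 : Nat) : Int) := by push_cast; ring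
  rw [h1, PySem.List.pySetD_natCast]
  simp only [PySem.List.pyGetD_natCast]
  rw [getD_append_len, getD_append_len1, set_append_len]

/-- Forward (even-step) sweep on a buffer `pfx ++ c :: v ++ e :: sfx`. -/
lemma sweepUp_spec (v : List Int) (pfx : List Int) (c e : Int) (sfx : List Int) :
    azSweepUp (pfx ++ c :: (v ++ e :: sfx)) ((pfx.length : Int) + 1)
        ((pfx.length : Int) + 1 + v.length + 1) =
      pfx ++ c :: (scanSum c v ++ (e + (c + v.sum)) :: sfx) := by
  induction v generalizing pfx c with
  | nil =>
      unfold azSweepUp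
      simp only [List.length_nil, Nat.cast_zero, List.nil_append, add_zero]
      rw [PySem.List.pyRange_one_cons (by omega)]
      rw [PySem.List.pyRange_one_eq_nil (by omega)]
      simp only [List.foldl_cons, List.foldl_nil]
      rw [update_left]
      simp [scanSum]
  | cons x t ih =>
      unfold azSweepUp
      simp only [List.length_cons, Nat.cast_add, Nat.cast_one, List.cons_append]
      rw [PySem.List.pyRange_one_cons (by omega)]
      simp only [List.foldl_cons]
      rw [update_left]
      have hc : x + c = c + x := add_comm x c
      rw [hc]
      have hih := ih (pfx ++ [c]) (c + x)
      unfold azSweepUp at hih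
      simp only [List.append_assoc, List.singleton_append, List.length_append,
        List.length_cons, List.length_nil] at hih
      push_cast at hih
      have hst : (pfx.length : Int) + 1 + ((t.length : Int) + 1) + 1
          = (pfx.length : Int) + 1 + 1 + (t.length : Int) + 1 := by ring
      rw [hst, hih]
      simp [scanSum, add_assoc]

/-- Backward (odd-step) sweep on a buffer `pfx ++ d :: v ++ c :: sfx`. -/
lemma sweepDown_spec (v : List Int) (pfx : List Int) (d c : Int) (sfx : List Int) :
    azSweepDown (pfx ++ d :: (v ++ c :: sfx)) ((pfx.length : Int) + v.length)
        ((pfx.length : Int) - 1) =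
      pfx ++ (d + (v.sum + c)) :: ((scanSum c v.reverse).reverse ++ c :: sfx) := by
  induction v using List.reverseRecOn generalizing c sfx with
  | nil =>
      unfold azSweepDown
      simp only [List.length_nil, Nat.cast_zero, List.nil_append, add_zero]
      rw [PySem.List.pyRange_neg_one_cons (by omega)]
      rw [PySem.List.pyRange_neg_one_eq_nil (by omega)]
      simp only [List.foldl_cons, List.foldl_nil]
      rw [update_right]
      simp [scanSum]
  | append_singleton v' x ih =>
      unfold azSweepDown
      simp only [List.length_append, List.length_cons, List.length_nil, Nat.cast_add,
        Nat.cast_one, Nat.cast_zero, List.append_assoc, List.singleton_append, List.cons_append,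
        List.nil_append, zero_add]
      rw [PySem.List.pyRange_neg_one_cons (by omega)]
      simp only [List.foldl_cons]
      -- the top update acts at index pfx.length + v'.length + 1, on cell x with right neighbour c
      have hP : pfx ++ d :: (v' ++ x :: c :: sfx) = (pfx ++ d :: v') ++ x :: c :: sfx := by
        simp
      have hL : (pfx.length : Int) + ((v'.length : Int) + 1)
          = (((pfx ++ d :: v').length : Nat) : Int) := by
        push_cast [List.length_append, List.length_cons]; ring
      rw [hP, hL, update_right]
      have hih := ih (x + c) (c :: sfx)
      unfold azSweepDown at hih
      simp only [List.append_assoc, List.cons_append, List.nil_append] at hih ⊢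
      have hL2 : (((pfx ++ d :: v').length : Nat) : Int) - 1
          = (pfx.length : Int) + (v'.length : Int) := by
        push_cast [List.length_append, List.length_cons]; ring
      rw [hL2]
      rw [hih]
      have hx : x + c = c + x := add_comm x c
      rw [hx]
      simp only [List.reverse_append, List.reverse_cons, List.reverse_nil, List.nil_append,
        List.singleton_append, scanSum, List.reverse_cons, List.sum_append, List.sum_cons,
        List.sum_nil, List.append_assoc, List.cons_append]
      have hs : v'.sum + (x + 0) + c = v'.sum + (c + x) := by ring
      rw [hs]

def zeros (k : Nat) : List Int := List.replicate k 0

lemma zeros_succ (k : Nat) : zeros (k + 1) = 0 :: zeros k := rfl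

lemma zeros_succ' (k : Nat) : zeros (k + 1) = zeros k ++ [0] := by
  simp [zeros, List.replicate_succ']

lemma length_zeros (k : Nat) : (zeros k).length = k := by simp [zeros]

/-- last element of row `E n`, read the way B reads it. -/
lemma lastE_of_reverse (n : Nat) (z : Int) (w : List Int) (h : (E n).reverse = z :: w) :
    lastE n = z := by
  have hE : E n = w.reverse ++ [z] := by
    have := congrArg List.reverse h
    simpa using this
  rw [lastE, hE, PySem.List.pyGetD_neg_one_append_singleton]

lemma pyGetD_at (pfx : List Int) (y : Int) (rest : List Int) (i : Int)
    (h : i = (pfx.length : Int)) : PySem.List.pyGetD (pfx ++ y :: rest) i 0 = y := by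
  subst h
  rw [PySem.List.pyGetD_natCast, getD_append_len]

lemma E_reverse_succ (i : Nat) (d : Int) (v : List Int) (h : E i = d :: v) :
    (E (i + 1)).reverse = (d + (v.sum + 0)) :: ((scanSum 0 v.reverse).reverse ++ [0]) := by
  rw [E_succ, h]
  simp only [List.reverse_cons, scanSum_append, scanSum, List.reverse_append,
    List.reverse_nil, List.nil_append, List.singleton_append, List.sum_reverse]
  have hs : (0 : Int) + v.sum + d = d + (v.sum + 0) := by ring
  rw [hs]
  simp

lemma E_step_even (n : Nat) (tl : List Int) (h : E n = 0 :: tl) :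
    E (n + 1) = 0 :: (scanSum 0 tl.reverse ++ [(0 : Int) + ((0 : Int) + tl.reverse.sum)]) := by
  rw [E_succ, h]
  simp only [List.reverse_cons, scanSum_append, scanSum]
  have hs : (0 : Int) + tl.reverse.sum + 0 = 0 + (0 + tl.reverse.sum) := by ring
  rw [hs]

/-- Step 0 of A's loop: empty sweep, yields the centre cell. -/
lemma azStep_zero (m cN : Nat) (out : List Int) :
    azStep (cN : Int) (zeros cN ++ (E 0 ++ zeros (m - cN - 1)), out) 0
      = (zeros cN ++ (E 0 ++ zeros (m - cN - 1)), out ++ [lastE 0]) := by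
  have h1 : PySem.Int.mod 0 2 = 0 := by
    rw [PySem.Int.mod_eq_emod_of_pos (by norm_num)]
    decide
  have h2 : PySem.Int.floordiv (0 - 1) 2 = -1 := by
    rw [PySem.Int.floordiv_eq_ediv_of_pos (by norm_num)]
    decide
  unfold azStep
  rw [h1, h2]
  rw [if_neg (by decide)]
  simp only [azSweepUp, sub_neg_eq_add, add_zero]
  rw [PySem.List.pyRange_one_eq_nil (by omega)]
  simp only [List.foldl_nil]
  rw [Prod.mk.injEq]
  refine ⟨rfl, ?_⟩
  have hy : (cN : Int) + 1 - 1 = ((zeros cN).length : Int) := by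
    rw [length_zeros]; ring
  rw [show E 0 = [(1 : Int)] from rfl]
  rw [List.singleton_append, pyGetD_at (zeros cN) 1 (zeros (m - cN - 1)) _ hy]
  rfl

/-- Odd step `i = 2k+1` of A's loop: downward sweep turns row `E (2k)` into `E (2k+1)` reversed. -/
lemma azStep_odd (m cN k : Nat) (out : List Int) (hk : k ≤ cN) (hm : cN + k + 2 ≤ m) :
    azStep (cN : Int) (zeros (cN - k) ++ (E (2 * k) ++ zeros (m - cN - k - 1)), out)
        ((2 * k + 1 : Nat) : Int)
      = (zeros (cN - k) ++ ((E (2 * k + 1)).reverse ++ zeros (m - cN - k - 2)),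
          out ++ [lastE (2 * k + 1)]) := by
  obtain ⟨d, v, hEv⟩ : ∃ d v, E (2 * k) = d :: v := by
    cases hE : E (2 * k) with
    | nil => exact absurd hE (E_ne_nil _)
    | cons d v => exact ⟨d, v, rfl⟩
  have hvlen : v.length = 2 * k := by
    have := length_E (2 * k); rw [hEv] at this; simpa using this
  have h1 : PySem.Int.mod ((2 * k + 1 : Nat) : Int) 2 = 1 := by
    rw [PySem.Int.mod_eq_emod_of_pos (by norm_num)]; push_cast; omega
  have h2 : PySem.Int.floordiv (((2 * k + 1 : Nat) : Int) - 1) 2 = (k : Int) := by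
    rw [PySem.Int.floordiv_eq_ediv_of_pos (by norm_num)]; push_cast; omega
  unfold azStep
  rw [h1, h2]
  rw [if_pos (by decide)]
  dsimp only
  have hsplit : m - cN - k - 1 = (m - cN - k - 2) + 1 := by omega
  rw [hEv, hsplit, zeros_succ]
  have hb : zeros (cN - k) ++ ((d :: v) ++ (0 :: zeros (m - cN - k - 2)))
      = zeros (cN - k) ++ d :: (v ++ 0 :: zeros (m - cN - k - 2)) := by simp
  rw [hb]
  have hstart : (cN : Int) + (k : Int) = (((zeros (cN - k)).length : Nat) : Int) + (v.length : Int) := by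
    rw [length_zeros, hvlen]; omega
  rw [hstart]
  have hstop : (((zeros (cN - k)).length : Nat) : Int) + (v.length : Int) - ((2 * k + 1 : Nat) : Int)
      = (((zeros (cN - k)).length : Nat) : Int) - 1 := by
    rw [length_zeros, hvlen]; omega
  rw [hstop, sweepDown_spec]
  rw [Prod.mk.injEq]
  refine ⟨?_, ?_⟩
  · rw [E_reverse_succ (2 * k) d v hEv]
    simp
  · have hy : (((zeros (cN - k)).length : Nat) : Int) - 1 + 1 = (((zeros (cN - k)).length : Nat) : Int) := by
      ring
    rw [hy, pyGetD_at _ _ _ _ rfl,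
        lastE_of_reverse (2 * k + 1) _ _ (E_reverse_succ (2 * k) d v hEv)]

/-- Even step `i = 2j+2` of A's loop: upward sweep turns reversed row `E (2j+1)` into `E (2j+2)`. -/
lemma azStep_even (m cN j : Nat) (out : List Int) (hj : j + 1 ≤ cN) (hm : cN + j + 2 ≤ m) :
    azStep (cN : Int) (zeros (cN - j) ++ ((E (2 * j + 1)).reverse ++ zeros (m - cN - j - 2)), out)
        ((2 * j + 2 : Nat) : Int)
      = (zeros (cN - (j + 1)) ++ (E (2 * j + 2) ++ zeros (m - cN - (j + 1) - 1)),
          out ++ [lastE (2 * j + 2)]) := by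
  obtain ⟨tl, htl⟩ : ∃ tl, E (2 * j + 1) = 0 :: tl := ⟨_, E_succ (2 * j)⟩
  have htlen : tl.length = 2 * j + 1 := by
    have := length_E (2 * j + 1); rw [htl] at this; simpa using this
  have h1 : PySem.Int.mod ((2 * j + 2 : Nat) : Int) 2 = 0 := by
    rw [PySem.Int.mod_eq_emod_of_pos (by norm_num)]; push_cast; omega
  have h2 : PySem.Int.floordiv (((2 * j + 2 : Nat) : Int) - 1) 2 = (j : Int) := by
    rw [PySem.Int.floordiv_eq_ediv_of_pos (by norm_num)]; push_cast; omega
  unfold azStep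
  rw [h1, h2]
  rw [if_neg (by decide)]
  dsimp only
  have hsplit : cN - j = (cN - j - 1) + 1 := by omega
  rw [htl, hsplit, zeros_succ']
  have hb : (zeros (cN - j - 1) ++ [0]) ++ ((0 :: tl).reverse ++ zeros (m - cN - j - 2))
      = zeros (cN - j - 1) ++ 0 :: (tl.reverse ++ 0 :: zeros (m - cN - j - 2)) := by
    simp
  rw [hb]
  have hstart : (cN : Int) - (j : Int) = (((zeros (cN - j - 1)).length : Nat) : Int) + 1 := by
    rw [length_zeros]; omega
  rw [hstart]
  have hstop : (((zeros (cN - j - 1)).length : Nat) : Int) + 1 + ((2 * j + 2 : Nat) : Int)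
      = (((zeros (cN - j - 1)).length : Nat) : Int) + 1 + (tl.reverse.length : Int) + 1 := by
    rw [length_zeros, List.length_reverse, htlen]; omega
  rw [hstop, sweepUp_spec]
  have hE2 := E_step_even (2 * j + 1) tl htl
  rw [Prod.mk.injEq]
  refine ⟨?_, ?_⟩
  · rw [show 2 * j + 1 + 1 = 2 * j + 2 from rfl] at hE2
    rw [hE2]
    have hz : cN - (j + 1) = cN - j - 1 := by omega
    have hz2 : m - cN - (j + 1) - 1 = m - cN - j - 2 := by omega
    rw [hz, hz2]
    simp
  · rw [show 2 * j + 1 + 1 = 2 * j + 2 from rfl] at hE2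
    have hy : (((zeros (cN - j - 1)).length : Nat) : Int) + 1 + (tl.reverse.length : Int) + 1 - 1
        = (((zeros (cN - j - 1) ++ 0 :: scanSum 0 tl.reverse).length : Nat) : Int) := by
      simp [length_scanSum]; ring
    have hshape : zeros (cN - j - 1) ++ 0 :: (scanSum 0 tl.reverse
          ++ ((0 : Int) + ((0 : Int) + tl.reverse.sum)) :: zeros (m - cN - j - 2))
        = (zeros (cN - j - 1) ++ 0 :: scanSum 0 tl.reverse)
            ++ ((0 : Int) + ((0 : Int) + tl.reverse.sum)) :: zeros (m - cN - j - 2) := by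
      simp
    rw [hshape, pyGetD_at _ _ _ _ hy]
    have hlast : lastE (2 * j + 2) = (0 : Int) + ((0 : Int) + tl.reverse.sum) := by
      rw [lastE, hE2]
      rw [show (0 : Int) :: (scanSum 0 tl.reverse ++ [(0 : Int) + ((0 : Int) + tl.reverse.sum)])
            = ((0 : Int) :: scanSum 0 tl.reverse) ++ [(0 : Int) + ((0 : Int) + tl.reverse.sum)] from by simp,
          PySem.List.pyGetD_neg_one_append_singleton]
    rw [hlast]

/-- A's buffer after processing step index `i`. -/
def aShape (m cN i : Nat) : List Int :=
  if i % 2 = 0 then zeros (cN - i / 2) ++ (E i ++ zeros (m - cN - i / 2 - 1))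
  else zeros (cN - i / 2) ++ ((E i).reverse ++ zeros (m - cN - i / 2 - 2))

lemma aShape_even (m cN i k : Nat) (h : i = 2 * k) :
    aShape m cN i = zeros (cN - k) ++ (E i ++ zeros (m - cN - k - 1)) := by
  subst h; unfold aShape
  rw [if_pos (by omega), show 2 * k / 2 = k from by omega]

lemma aShape_odd (m cN i k : Nat) (h : i = 2 * k + 1) :
    aShape m cN i = zeros (cN - k) ++ ((E i).reverse ++ zeros (m - cN - k - 2)) := by
  subst h; unfold aShape
  rw [if_neg (by omega), show (2 * k + 1) / 2 = k from by omega]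

/-- Invariant of A's outer loop: after `t` steps the buffer is the (possibly reversed)
current Entringer row padded with zeros, and the yields so far are the row maxima. -/
lemma aFold_inv (m cN : Nat) (hcl : 2 * cN + 1 ≤ m) (hcu : m ≤ 2 * cN + 2) :
    ∀ t, 1 ≤ t → t ≤ m →
    (PySem.List.pyRange 0 (t : Int) 1).foldl (azStep (cN : Int))
        (zeros cN ++ (E 0 ++ zeros (m - cN - 1)), [])
      = (aShape m cN (t - 1), (List.range t).map lastE) := by
  intro t
  induction t with
  | zero => intro h _; omega
  | succ t ih =>
      intro _ htm
      by_cases ht0 : t = 0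
      · subst ht0
        rw [show ((0 + 1 : Nat) : Int) = (0 : Int) + 1 from by norm_num,
          PySem.List.pyRange_one_singleton]
        simp only [List.foldl_cons, List.foldl_nil]
        rw [azStep_zero m cN []]
        rw [aShape_even m cN 0 0 (by omega)]
        simp
      · have ht1 : 1 ≤ t := by omega
        have hsr : PySem.List.pyRange 0 ((t + 1 : Nat) : Int) 1
            = PySem.List.pyRange 0 ((t : Nat) : Int) 1 ++ [((t : Nat) : Int)] := by
          rw [show ((t + 1 : Nat) : Int) = ((t : Nat) : Int) + 1 from by push_cast; ring]
          exact PySem.List.pyRange_one_succ_right (by exact_mod_cast Nat.zero_le t)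
        rw [hsr, List.foldl_append, ih ht1 (by omega)]
        simp only [List.foldl_cons, List.foldl_nil]
        rcases Nat.even_or_odd t with ⟨k, hk⟩ | ⟨k, hk⟩
        · -- t = 2k with k ≥ 1 : an even step, upward sweep
          have hk1 : 1 ≤ k := by omega
          rw [aShape_odd m cN (t - 1) (k - 1) (by omega)]
          rw [show t - 1 = 2 * (k - 1) + 1 from by omega]
          rw [show ((t : Nat) : Int) = ((2 * (k - 1) + 2 : Nat) : Int) from by push_cast; omega]
          rw [azStep_even m cN (k - 1) _ (by omega) (by omega)]
          rw [Prod.mk.injEq]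
          refine ⟨?_, ?_⟩
          · rw [aShape_even m cN (t + 1 - 1) k (by omega)]
            rw [show 2 * (k - 1) + 2 = t + 1 - 1 from by omega]
            rw [show cN - ((k - 1) + 1) = cN - k from by omega,
              show m - cN - ((k - 1) + 1) - 1 = m - cN - k - 1 from by omega]
          · rw [List.range_succ, List.map_append]
            rw [show 2 * (k - 1) + 2 = t from by omega]
            rfl
        · -- t = 2k+1 : an odd step, downward sweep
          rw [aShape_even m cN (t - 1) k (by omega)]
          rw [show t - 1 = 2 * k from by omega]
          rw [show ((t : Nat) : Int) = ((2 * k + 1 : Nat) : Int) from by push_cast; omega]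
          rw [azStep_odd m cN k _ (by omega) (by omega)]
          rw [Prod.mk.injEq]
          refine ⟨?_, ?_⟩
          · rw [aShape_odd m cN (t + 1 - 1) k (by omega)]
            rw [show 2 * k + 1 = t + 1 - 1 from by omega]
          · rw [List.range_succ, List.map_append]
            rw [show 2 * k + 1 = t from by omega]
            rfl

/-- B's loop produces exactly the final entries of the Entringer rows. -/
lemma bFold_eq : ∀ (t : Nat), 1 ≤ t →
    (PySem.List.pyRange 1 (t : Int) 1).foldl
      (fun (s : List Int × List Int) _ =>
        let r := zzNextRow s.1
        (r, s.2 ++ [PySem.List.pyGetD r (-1) 0])) ([1], [1])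
    = (E (t - 1), (List.range t).map lastE) := by
  intro t
  induction t with
  | zero => intro h; omega
  | succ t ih =>
      intro _
      by_cases ht0 : t = 0
      · subst ht0
        rw [show ((0 + 1 : Nat) : Int) = (1 : Int) from by norm_num,
          PySem.List.pyRange_one_eq_nil (by norm_num)]
        simp only [List.foldl_nil]
        rw [Prod.mk.injEq]
        refine ⟨rfl, ?_⟩
        rw [show List.range 1 = [0] from rfl]
        simp [lastE, E]
        decide
      · have ht1 : 1 ≤ t := by omega
        have hsr : PySem.List.pyRange 1 ((t + 1 : Nat) : Int) 1
            = PySem.List.pyRange 1 ((t : Nat) : Int) 1 ++ [((t : Nat) : Int)] := by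
          rw [show ((t + 1 : Nat) : Int) = ((t : Nat) : Int) + 1 from by push_cast; ring]
          exact PySem.List.pyRange_one_succ_right (by exact_mod_cast ht1)
        rw [hsr, List.foldl_append, ih ht1]
        simp only [List.foldl_cons, List.foldl_nil]
        have hEt : zzNextRow (E (t - 1)) = E t := by
          rw [show t = (t - 1) + 1 from by omega]
          rfl
        rw [hEt, Prod.mk.injEq]
        refine ⟨by rw [show t + 1 - 1 = t from by omega], ?_⟩
        rw [List.range_succ, List.map_append]
        rfl

-- ===== VERDICT (by name: the statement is the Claim_ definition above) =====
theorem euler_zigzag_spec : Claim_equal_euler_zigzag := by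
  intro n _
  unfold Spec_euler_zigzag
  by_cases hn : n ≤ 0
  · simp [euler_zigzag, euler_zigzag_alt, hn]
  · obtain ⟨m, rfl⟩ : ∃ m : Nat, n = (m : Int) := ⟨n.toNat, by omega⟩
    have hm1 : 1 ≤ m := by omega
    have hcl : 2 * ((m - 1) / 2) + 1 ≤ m := by omega
    have hcu : m ≤ 2 * ((m - 1) / 2) + 2 := by omega
    unfold euler_zigzag euler_zigzag_alt
    rw [if_neg hn, if_neg hn]
    have hcen : PySem.Int.floordiv ((m : Int) - 1) 2 = (((m - 1) / 2 : Nat) : Int) := by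
      rw [show (m : Int) - 1 = ((m - 1 : Nat) : Int) from by omega,
        show (2 : Int) = ((2 : Nat) : Int) from by norm_num, PySem.Int.floordiv_natCast]
    dsimp only
    rw [hcen]
    have hsplitrep : List.replicate m (0 : Int)
        = zeros ((m - 1) / 2) ++ 0 :: zeros (m - (m - 1) / 2 - 1) := by
      have h1 : m = (m - 1) / 2 + (m - (m - 1) / 2 - 1 + 1) := by omega
      conv_lhs => rw [h1]
      simp [zeros, List.replicate_add, List.replicate_succ]
    have hrow : PySem.List.pySetD (List.replicate ((m : Int)).toNat (0 : Int))
        (((m - 1) / 2 : Nat) : Int) 1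
        = zeros ((m - 1) / 2) ++ (E 0 ++ zeros (m - (m - 1) / 2 - 1)) := by
      rw [PySem.List.pySetD_natCast, show ((m : Int)).toNat = m from by omega, hsplitrep]
      rw [set_append_len' (zeros ((m - 1) / 2)) 0 1 _ _ (length_zeros _).symm]
      rfl
    rw [hrow]
    rw [aFold_inv m ((m - 1) / 2) hcl hcu m hm1 le_rfl]
    rw [bFold_eq m hm1]
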